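-- pv_equiv track=rewrite | github.com/RyotaYokouchi/lab_dev | lab_dev/strange_face/helpers.py | separateEye
-- ===== SOURCE A (Python) =====
-- def separateEye(eye_list):
--     # 左目と右目の判別
--     big_x = -9999
--     right_eye = []
--     left_eye = []
--     count = 0
--     for (x, y, w, h) in eye_list:
--         if big_x < x:
--             left_eye.append(eye_list[count])
--             big_x = x
--         else:
--             right_eye.append(eye_list[count])
--         count += 1
--     return right_eye, left_eye
-- ===== SOURCE B (Python) =====
-- def separateEye(eye_list):
--     # Prefix-maximum table first, then two partition passes over zip.
--     maxes = []
--     m = -9999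
--     for (x, y, w, h) in eye_list:
--         maxes.append(m)
--         m = max(m, x)
--     left_eye = [e for e, mx in zip(eye_list, maxes) if e[0] > mx]
--     right_eye = [e for e, mx in zip(eye_list, maxes) if e[0] <= mx]
--     return right_eye, left_eye
-- ===== Notes on version B (the rewrite author's own statement) =====
-- stated objective: alternative
-- what changed: Replaces the single interleaved loop (running max + conditional appends to two accumulators) by a table-then-partition decomposition: one pass builds the prefix-maximum table, then two zip/filter comprehensions partition the elements.
import Mathlib
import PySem

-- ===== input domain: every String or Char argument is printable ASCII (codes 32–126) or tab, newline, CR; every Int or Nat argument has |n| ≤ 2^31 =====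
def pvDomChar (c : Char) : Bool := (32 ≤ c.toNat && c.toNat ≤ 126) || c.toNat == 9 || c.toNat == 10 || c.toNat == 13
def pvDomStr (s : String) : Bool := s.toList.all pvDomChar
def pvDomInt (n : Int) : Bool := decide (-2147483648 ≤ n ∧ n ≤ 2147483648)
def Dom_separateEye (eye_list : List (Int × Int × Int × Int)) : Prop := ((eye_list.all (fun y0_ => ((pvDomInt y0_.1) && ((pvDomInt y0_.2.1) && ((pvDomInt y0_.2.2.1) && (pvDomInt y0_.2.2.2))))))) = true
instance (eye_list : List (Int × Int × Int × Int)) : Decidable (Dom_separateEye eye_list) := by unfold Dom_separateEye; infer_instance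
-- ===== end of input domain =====

-- B replaces A's single interleaved loop by a prefix-maximum table followed by two
-- zip/filter partition passes (alternative decomposition; same cost).

-- ===== PORT A =====
-- the loop: state (big_x, right_eye, left_eye, count); the appended value is eye_list[count],
-- kept as the indexing A performs (count always indexes the current element, so .getD e is never taken)
def sepLoopA (full : List (Int × Int × Int × Int)) :
    List (Int × Int × Int × Int) → Int → List (Int × Int × Int × Int) →
    List (Int × Int × Int × Int) → Int →
    (List (Int × Int × Int × Int)) × (List (Int × Int × Int × Int))
  | [], _, right_eye, left_eye, _ => (right_eye, left_eye)
  | e :: rest, big_x, right_eye, left_eye, count =>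
    let elem := (PySem.List.pyGet? full count).getD e
    if big_x < e.1 then
      sepLoopA full rest e.1 right_eye (left_eye ++ [elem]) (count + 1)
    else
      sepLoopA full rest big_x (right_eye ++ [elem]) left_eye (count + 1)

def separateEye (eye_list : List (Int × Int × Int × Int)) : (List (Int × Int × Int × Int)) × (List (Int × Int × Int × Int)) :=
  sepLoopA eye_list eye_list (-9999) [] [] 0

-- ===== PORT B =====
-- maxes[i] = max of -9999 and the x's strictly before position i
def maxesOf (l : List (Int × Int × Int × Int)) : List Int :=
  (l.foldl (fun (st : List Int × Int) e => (st.1 ++ [st.2], max st.2 e.1)) ([], -9999)).1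

def separateEye_alt (eye_list : List (Int × Int × Int × Int)) : (List (Int × Int × Int × Int)) × (List (Int × Int × Int × Int)) :=
  let maxes := maxesOf eye_list
  let z := eye_list.zip maxes
  (((z.filter (fun p => p.1.1 ≤ p.2)).map Prod.fst),
   ((z.filter (fun p => p.2 < p.1.1)).map Prod.fst))

-- ===== PRECONDITION & SPEC =====
def Spec_separateEye (eye_list : List (Int × Int × Int × Int)) (out : (List (Int × Int × Int × Int)) × (List (Int × Int × Int × Int))) : Prop := out = separateEye_alt eye_list
instance (eye_list : List (Int × Int × Int × Int)) (out : (List (Int × Int × Int × Int)) × (List (Int × Int × Int × Int))) : Decidable (Spec_separateEye eye_list out) := by unfold Spec_separateEye; infer_instance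

-- ===== CLAIM (what is proved, stated in full; the proofs are below) =====
def Claim_equal_separateEye : Prop := ∀ (eye_list : List (Int × Int × Int × Int)), Dom_separateEye eye_list → Spec_separateEye eye_list (separateEye eye_list)

-- ===== LEMMAS AND PROOFS =====

-- the prefix-max fold with seed accumulator ms prepends ms
theorem maxesGo_acc (l : List (Int × Int × Int × Int)) (ms : List Int) (m : Int) :
    (l.foldl (fun (st : List Int × Int) e => (st.1 ++ [st.2], max st.2 e.1)) (ms, m)).1 =
      ms ++ (l.foldl (fun (st : List Int × Int) e => (st.1 ++ [st.2], max st.2 e.1)) ([], m)).1 := by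
  induction l generalizing ms m with
  | nil => simp
  | cons e rest ih =>
    simp only [List.foldl_cons, List.nil_append]
    rw [ih (ms ++ [m]) (max m e.1), ih [m] (max m e.1)]
    simp

-- the element A indexes out of the full list is the current loop element
theorem pyGet_drop (full rest : List (Int × Int × Int × Int)) (e : Int × Int × Int × Int)
    (count : Int) (h0 : 0 ≤ count) (hd : full.drop count.toNat = e :: rest) :
    PySem.List.pyGet? full count = some e := by
  rw [PySem.List.pyGet?_of_nonneg full h0]
  have : full[count.toNat]? = (full.drop count.toNat)[0]? := by
    rw [List.getElem?_drop]
    simp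
  rw [this, hd]
  rfl

theorem sepLoopA_eq (rest : List (Int × Int × Int × Int)) :
    ∀ (full : List (Int × Int × Int × Int)) (big_x : Int)
      (right_eye left_eye : List (Int × Int × Int × Int)) (count : Int),
      0 ≤ count → full.drop count.toNat = rest →
      sepLoopA full rest big_x right_eye left_eye count =
        (right_eye ++ ((rest.zip
            (rest.foldl (fun (st : List Int × Int) e => (st.1 ++ [st.2], max st.2 e.1)) ([], big_x)).1).filter
            (fun p => p.1.1 ≤ p.2)).map Prod.fst,
         left_eye ++ ((rest.zip
            (rest.foldl (fun (st : List Int × Int) e => (st.1 ++ [st.2], max st.2 e.1)) ([], big_x)).1).filter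
            (fun p => p.2 < p.1.1)).map Prod.fst) := by
  induction rest with
  | nil => intro full big_x r l count _ _; simp [sepLoopA]
  | cons e rest ih =>
    intro full big_x r l count h0 hd
    have hget := pyGet_drop full rest e count h0 hd
    have hd' : full.drop (count + 1).toNat = rest := by
      have : (count + 1).toNat = count.toNat + 1 := by omega
      rw [this, ← List.drop_drop, hd]
      rfl
    have hmax : (((e :: rest).foldl (fun (st : List Int × Int) e => (st.1 ++ [st.2], max st.2 e.1)) ([], big_x)).1) =
        big_x :: ((rest.foldl (fun (st : List Int × Int) e => (st.1 ++ [st.2], max st.2 e.1)) ([], max big_x e.1)).1) := by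
      simp only [List.foldl_cons]
      rw [maxesGo_acc]
      rfl
    simp only [sepLoopA, hget, Option.getD_some, hmax, List.zip_cons_cons, List.filter_cons]
    by_cases hb : big_x < e.1
    · have h1 : (fun p : (Int × Int × Int × Int) × Int => decide (p.1.1 ≤ p.2)) (e, big_x) = false := by
        simp; omega
      have h2 : (fun p : (Int × Int × Int × Int) × Int => decide (p.2 < p.1.1)) (e, big_x) = true := by
        simp; omega
      rw [if_pos hb, ih full e.1 r (l ++ [e]) (count + 1) (by omega) hd']
      have : max big_x e.1 = e.1 := by omega
      simp [h1, h2, this]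
    · have h1 : (fun p : (Int × Int × Int × Int) × Int => decide (p.1.1 ≤ p.2)) (e, big_x) = true := by
        simp; omega
      have h2 : (fun p : (Int × Int × Int × Int) × Int => decide (p.2 < p.1.1)) (e, big_x) = false := by
        simp; omega
      rw [if_neg hb, ih full big_x (r ++ [e]) l (count + 1) (by omega) hd']
      have : max big_x e.1 = big_x := by omega
      simp [h1, h2, this]

-- ===== VERDICT (by name: the statement is the Claim_ definition above) =====
theorem separateEye_spec : Claim_equal_separateEye := by
  intro eye_list _
  unfold Spec_separateEye separateEye separateEye_alt maxesOf
  rw [sepLoopA_eq eye_list eye_list (-9999) [] [] 0 (by omega) (by rfl)]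
  simp
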